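-- pv_equiv track=rewrite | github.com/Sonnet-Songbird/starsector-kr-temp-patcher | scripts/prepare_obf_batches.py | ui_score
-- ===== SOURCE A (Python) =====
-- def ui_score(s):
--     score = 0
--     if " " in s: score += 3
--     if s and s[0].isupper(): score += 2
--     if any(c in s for c in ".,!?:;"): score += 1
--     if "%s" in s or "%d" in s: score += 2
--     if len(s) > 400: score -= 2
--     return score
-- ===== SOURCE B (Python) =====
-- def ui_score(s):
--     has_space = has_punct = has_fmt = False
--     prev = ''
--     n = 0
--     for c in s:
--         if c == ' ':
--             has_space = True
--         if c in '.,!?:;':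
--             has_punct = True
--         if prev == '%' and c in 'sd':
--             has_fmt = True
--         prev = c
--         n += 1
--     score = 0
--     if has_space:
--         score += 3
--     if s and s[0].isupper():
--         score += 2
--     if has_punct:
--         score += 1
--     if has_fmt:
--         score += 2
--     if n > 400:
--         score -= 2
--     return score
-- ===== Notes on version B (the rewrite author's own statement) =====
-- stated objective: alternative
-- what changed: A tests five properties with five independent scans of s (substring searches, an any-generator, len); B makes a single pass over the characters maintaining booleans for space, punctuation and a '%s'/'%d' adjacent pair detected via the previous character, plus a length counter, then assembles the score.
import Mathlib
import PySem

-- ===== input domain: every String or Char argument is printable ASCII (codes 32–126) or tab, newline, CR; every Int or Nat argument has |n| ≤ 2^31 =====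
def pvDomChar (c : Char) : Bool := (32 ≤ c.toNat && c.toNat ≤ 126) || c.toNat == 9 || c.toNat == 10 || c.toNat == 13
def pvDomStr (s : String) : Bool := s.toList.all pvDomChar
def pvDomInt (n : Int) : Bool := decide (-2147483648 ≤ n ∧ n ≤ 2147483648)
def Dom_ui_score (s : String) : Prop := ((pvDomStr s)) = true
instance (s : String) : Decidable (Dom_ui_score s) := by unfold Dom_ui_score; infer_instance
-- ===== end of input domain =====

-- B replaces A's five independent scans of s with one left-to-right pass maintaining
-- booleans (space / punctuation / '%s'-'%d' pair via the previous character) and a length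
-- counter; objective: alternative decomposition, same O(n) cost.


-- ===== PORT A =====
-- literal transliteration of A: five independent tests, each scanning s on its own
def ui_score (s : String) : Int :=
  let score : Int := 0
  let score := if PySem.Str.isIn " " s then score + 3 else score
  let score := if s.toList ≠ [] ∧ ((PySem.Str.pyGet? s 0).map PySem.Chars.isupper).getD false = true
               then score + 2 else score
  let score := if ".,!?:;".toList.any (fun c => PySem.Chars.isIn [c] s.toList)
               then score + 1 else score
  let score := if PySem.Str.isIn "%s" s || PySem.Str.isIn "%d" s then score + 2 else score
  let score := if PySem.Str.len s > 400 then score - 2 else score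
  score

-- ===== PORT B =====
-- loop body of Source B: state (has_space, has_punct, has_fmt, prev, n); Python's prev = '' is `none`
def uiLoop (st : Bool × Bool × Bool × Option Char × Nat) (c : Char) :
    Bool × Bool × Bool × Option Char × Nat :=
  match st with
  | (hs, hp, hf, prev, n) =>
    (hs || (c == ' '),
     hp || ".,!?:;".toList.contains c,
     hf || ((prev == some '%') && "sd".toList.contains c),
     some c,
     n + 1)

def ui_score_alt (s : String) : Int :=
  match s.toList.foldl uiLoop (false, false, false, none, 0) with
  | (hs, hp, hf, _, n) =>
    let score : Int := 0
    let score := if hs then score + 3 else score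
    let score := if (match s.toList with
                     | [] => false
                     | c :: _ => PySem.Chars.isupper c) then score + 2 else score
    let score := if hp then score + 1 else score
    let score := if hf then score + 2 else score
    let score := if (n : Int) > 400 then score - 2 else score
    score

-- ===== PRECONDITION & SPEC =====
def Spec_ui_score (s : String) (out : Int) : Prop := out = ui_score_alt s
instance (s : String) (out : Int) : Decidable (Spec_ui_score s out) := by unfold Spec_ui_score; infer_instance

-- ===== CLAIM (what is proved, stated in full; the proofs are below) =====
def Claim_equal_ui_score : Prop := ∀ (s : String), Dom_ui_score s → Spec_ui_score s (ui_score s)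

-- ===== LEMMAS AND PROOFS =====

-- structural description of the '%s'/'%d' detector carried by B's loop
def fmtAux : Option Char → List Char → Bool
  | _, [] => false
  | prev, c :: t => ((prev == some '%') && "sd".toList.contains c) || fmtAux (some c) t

-- the prev component after the loop
def prevEnd : Option Char → List Char → Option Char
  | p, [] => p
  | _, c :: t => prevEnd (some c) t

lemma uiLoop_inv (l : List Char) (hs hp hf : Bool) (prev : Option Char) (n : Nat) :
    l.foldl uiLoop (hs, hp, hf, prev, n) =
      (hs || l.contains ' ',
       hp || l.any (fun c => ".,!?:;".toList.contains c),
       hf || fmtAux prev l,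
       prevEnd prev l,
       n + l.length) := by
  induction l generalizing hs hp hf prev n with
  | nil => simp [fmtAux, prevEnd]
  | cons c t ih =>
    simp only [List.foldl_cons, uiLoop, ih, fmtAux, prevEnd, List.contains_cons,
      List.any_cons, List.length_cons, Prod.mk.injEq, Bool.or_assoc]
    refine ⟨by rw [Bool.beq_comm], trivial, trivial, trivial, by omega⟩

lemma up_iff (s : String) :
    (s.toList ≠ [] ∧ ((PySem.Str.pyGet? s 0).map PySem.Chars.isupper).getD false = true)
      ↔ (match s.toList with
         | [] => false
         | c :: _ => PySem.Chars.isupper c) = true := by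
  cases h : s.toList with
  | nil => simp [h]
  | cons c t => simp [h]

lemma fmt_step (c : Char) (t : List Char) :
    fmtAux none (c :: t) =
      (((c == '%') && (match t with | [] => false | d :: _ => "sd".toList.contains d))
        || fmtAux none t) := by
  cases t with
  | nil => simp [fmtAux]
  | cons d t2 => rfl

lemma fmt_iff (l : List Char) :
    fmtAux none l = true ↔ (['%', 's'] <:+: l ∨ ['%', 'd'] <:+: l) := by
  have hsd : "sd".toList = ['s', 'd'] := rfl
  induction l with
  | nil => simp [fmtAux]
  | cons c t ih =>
    rw [fmt_step]
    simp only [hsd, Bool.or_eq_true, ih, List.infix_cons_iff, List.cons_prefix_cons,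
      Bool.and_eq_true, beq_iff_eq]
    cases t with
    | nil => simp
    | cons d t2 =>
      simp only [List.cons_prefix_cons, List.contains_cons, List.contains_nil,
        Bool.or_eq_true, Bool.or_false, beq_iff_eq, List.nil_prefix, and_true]
      constructor
      · rintro (⟨hc, hd | hd⟩ | h) <;> subst_vars <;> tauto
      · rintro ((⟨hc, h⟩ | h) | (⟨hc, h⟩ | h)) <;> subst_vars <;> tauto

lemma isIn_singleton (c : Char) (l : List Char) :
    PySem.Chars.isIn [c] l = l.contains c := by
  rcases h : l.contains c with _ | _
  · simp only [List.contains_eq_mem, decide_eq_false_iff_not] at h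
    rw [PySem.Chars.isIn_eq_false_iff]
    intro hinf
    exact h ((List.singleton_infix_iff c l).mp hinf)
  · simp only [List.contains_eq_mem, decide_eq_true_eq] at h
    rw [PySem.Chars.isIn_iff_infix]
    exact (List.singleton_infix_iff c l).mpr h

-- ===== VERDICT (by name: the statement is the Claim_ definition above) =====
theorem ui_score_spec : Claim_equal_ui_score := by
  intro s _
  unfold Spec_ui_score ui_score ui_score_alt
  rw [uiLoop_inv]
  have hsp : PySem.Str.isIn " " s = s.toList.contains ' ' := by
    rw [show PySem.Str.isIn " " s = PySem.Chars.isIn [' '] s.toList from rfl, isIn_singleton]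
  have hpunct : ".,!?:;".toList.any (fun c => PySem.Chars.isIn [c] s.toList)
      = s.toList.any (fun c => ".,!?:;".toList.contains c) := by
    simp only [isIn_singleton]
    rw [Bool.eq_iff_iff]
    simp only [List.any_eq_true, List.contains_eq_mem, decide_eq_true_eq]
    exact ⟨fun ⟨c, h1, h2⟩ => ⟨c, h2, h1⟩, fun ⟨c, h1, h2⟩ => ⟨c, h2, h1⟩⟩
  have hfmt : (PySem.Str.isIn "%s" s || PySem.Str.isIn "%d" s) = fmtAux none s.toList := by
    rw [Bool.eq_iff_iff]
    rw [show PySem.Str.isIn "%s" s = PySem.Chars.isIn ['%', 's'] s.toList from rfl,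
        show PySem.Str.isIn "%d" s = PySem.Chars.isIn ['%', 'd'] s.toList from rfl]
    simp only [Bool.or_eq_true, PySem.Chars.isIn_iff_infix, fmt_iff]
  have hlen : PySem.Str.len s = (s.toList.length : Int) := by
    simp [PySem.Str.len_eq]
  rw [hsp, hpunct, hfmt, hlen]
  simp only [Bool.false_or, Nat.zero_add, up_iff]
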